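-- pv_equiv track=rewrite | github.com/AmaziiingChen/microflow | src/utils/rss_strategy.py | _extract_block_metrics
-- ===== SOURCE A (Python) =====
-- from typing import Any, Dict, Iterable, List, Optional
--
-- def _extract_block_metrics(content_blocks: Any) -> Dict[str, int]:
--     heading_count = 0
--     list_count = 0
--     paragraph_count = 0
--
--     for block in content_blocks or []:
--         if not isinstance(block, dict):
--             continue
--         block_type = str(block.get("type") or "").strip().lower()
--         if block_type in {"title", "heading"}:
--             heading_count += 1
--         elif block_type == "list":
--             list_count += 1
--         elif block_type in {"paragraph", "quote"}:
--             paragraph_count += 1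
--
--     return {
--         "heading_count": heading_count,
--         "list_count": list_count,
--         "paragraph_count": paragraph_count,
--     }
-- ===== SOURCE B (Python) =====
-- def _extract_block_metrics(content_blocks):
--     types = [str(b.get("type") or "").strip().lower()
--              for b in (content_blocks or []) if isinstance(b, dict)]
--     return {
--         "heading_count": types.count("title") + types.count("heading"),
--         "list_count": types.count("list"),
--         "paragraph_count": types.count("paragraph") + types.count("quote"),
--     }
-- ===== Notes on version B (the rewrite author's own statement) =====
-- stated objective: simpler
-- what changed: Replaces the per-element if/elif counter loop with one comprehension that normalizes all block types into a list, then derives each metric by list.count lookups.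
import Mathlib
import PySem

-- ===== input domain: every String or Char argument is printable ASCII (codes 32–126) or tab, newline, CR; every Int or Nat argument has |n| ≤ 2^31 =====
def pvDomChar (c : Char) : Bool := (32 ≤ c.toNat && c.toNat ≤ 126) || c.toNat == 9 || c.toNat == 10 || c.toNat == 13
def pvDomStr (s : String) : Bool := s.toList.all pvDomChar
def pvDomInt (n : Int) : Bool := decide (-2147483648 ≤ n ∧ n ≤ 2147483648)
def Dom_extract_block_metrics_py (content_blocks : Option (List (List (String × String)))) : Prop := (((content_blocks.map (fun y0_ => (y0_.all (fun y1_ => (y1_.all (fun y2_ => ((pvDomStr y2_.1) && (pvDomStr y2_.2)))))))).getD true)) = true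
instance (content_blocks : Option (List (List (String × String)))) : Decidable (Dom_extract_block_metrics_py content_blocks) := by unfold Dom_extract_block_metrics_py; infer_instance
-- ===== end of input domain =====

-- B replaces the per-element if/elif counter loop with normalize-all-types-then-count lookups (objective: simpler).

-- ===== PORT A =====
-- str(block.get("type") or "").strip().lower(): values are strings, so `or ""` yields "" for a
-- missing key or an empty value, i.e. exactly getD "type" "".
def pvBlockType (block : List (String × String)) : String :=
  PySem.Str.lower (PySem.Str.strip ((PySem.Dict.mk block).getD "type" ""))

-- the loop body of A: the if/elif chain on block_type updating the three counters
def pvStepA (acc : Int × Int × Int) (block : List (String × String)) : Int × Int × Int :=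
  let block_type := pvBlockType block
  if block_type = "title" ∨ block_type = "heading" then (acc.1 + 1, acc.2.1, acc.2.2)
  else if block_type = "list" then (acc.1, acc.2.1 + 1, acc.2.2)
  else if block_type = "paragraph" ∨ block_type = "quote" then (acc.1, acc.2.1, acc.2.2 + 1)
  else acc

def extract_block_metrics_py (content_blocks : Option (List (List (String × String)))) : List (String × Int) :=
  -- `for block in content_blocks or []`; the isinstance(block, dict) guard is always true at this type
  match (content_blocks.getD []).foldl pvStepA (0, 0, 0) with
  | (heading_count, list_count, paragraph_count) =>
    [("heading_count", heading_count), ("list_count", list_count), ("paragraph_count", paragraph_count)]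

-- ===== PORT B =====
def extract_block_metrics_py_alt (content_blocks : Option (List (List (String × String)))) : List (String × Int) :=
  let types := (content_blocks.getD []).map pvBlockType
  [("heading_count", (types.count "title" : Int) + (types.count "heading" : Int)),
   ("list_count", (types.count "list" : Int)),
   ("paragraph_count", (types.count "paragraph" : Int) + (types.count "quote" : Int))]

-- ===== PRECONDITION & SPEC =====
def Spec_extract_block_metrics_py (content_blocks : Option (List (List (String × String)))) (out : List (String × Int)) : Prop := out = extract_block_metrics_py_alt content_blocks
instance (content_blocks : Option (List (List (String × String)))) (out : List (String × Int)) : Decidable (Spec_extract_block_metrics_py content_blocks out) := by unfold Spec_extract_block_metrics_py; infer_instance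

-- ===== CLAIM (what is proved, stated in full; the proofs are below) =====
def Claim_equal_extract_block_metrics_py : Prop := ∀ (content_blocks : Option (List (List (String × String)))), Dom_extract_block_metrics_py content_blocks → Spec_extract_block_metrics_py content_blocks (extract_block_metrics_py content_blocks)

-- ===== LEMMAS AND PROOFS =====
-- A's fold, from an arbitrary accumulator, adds exactly the category counts over the normalized types.
theorem pv_foldA (bs : List (List (String × String))) (h l p : Int) :
    bs.foldl pvStepA (h, l, p)
    = (h + ((bs.map pvBlockType).count "title" : Int) + ((bs.map pvBlockType).count "heading" : Int),
       l + ((bs.map pvBlockType).count "list" : Int),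
       p + ((bs.map pvBlockType).count "paragraph" : Int) + ((bs.map pvBlockType).count "quote" : Int)) := by
  induction bs generalizing h l p with
  | nil => simp
  | cons b bs ih =>
    rw [List.foldl_cons]
    simp only [pvStepA]
    split_ifs with h1 h2 h3
    all_goals rw [ih]
    all_goals simp only [List.map_cons, List.count_cons]
    · rcases h1 with h1 | h1 <;> · simp [h1, Prod.ext_iff]; omega
    · rw [not_or] at h1
      simp [h2, Prod.ext_iff]; omega
    · rw [not_or] at h1
      rcases h3 with h3 | h3 <;> · simp [h3, Prod.ext_iff]; omega
    · rw [not_or] at h1 h3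
      simp [h1.1, h1.2, h2, h3.1, h3.2]

-- ===== VERDICT (by name: the statement is the Claim_ definition above) =====
theorem extract_block_metrics_py_spec : Claim_equal_extract_block_metrics_py := by
  intro content_blocks _
  unfold Spec_extract_block_metrics_py extract_block_metrics_py extract_block_metrics_py_alt
  rw [pv_foldA]
  simp
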